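-- pv_equiv track=rewrite | github.com/Kim-Myeongseop/coding_practice | 프로그래머스/1/12935. 제일 작은 수 제거하기/제일 작은 수 제거하기.py | solution
-- ===== SOURCE A (Python) =====
-- def solution(arr):
--     min_num = arr[0]
--     min_idx = 0
--     for idx in range(len(arr)):
--         if arr[idx] < min_num:
--             min_num = arr[idx]
--             min_idx = idx
--     del arr[min_idx]
--     return arr if arr else [-1]
-- ===== SOURCE B (Python) =====
-- def solution(arr):
--     # Sort (value, index) pairs lexicographically; the first pair names the first
--     # occurrence of the minimum. Rebuild the answer from slices (no in-place del,
--     # unlike A, which mutates arr; return values agree).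
--     i = sorted(zip(arr, range(len(arr))))[0][1]
--     return arr[:i] + arr[i + 1:] or [-1]
-- ===== Notes on version B (the rewrite author's own statement) =====
-- stated objective: alternative
-- what changed: A's fused linear scan tracking the running minimum and its index, followed by in-place del, is replaced by sorting the (value, index) pairs lexicographically, reading the minimum's first index off the sorted head, and rebuilding the result from two slices.
import Mathlib
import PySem

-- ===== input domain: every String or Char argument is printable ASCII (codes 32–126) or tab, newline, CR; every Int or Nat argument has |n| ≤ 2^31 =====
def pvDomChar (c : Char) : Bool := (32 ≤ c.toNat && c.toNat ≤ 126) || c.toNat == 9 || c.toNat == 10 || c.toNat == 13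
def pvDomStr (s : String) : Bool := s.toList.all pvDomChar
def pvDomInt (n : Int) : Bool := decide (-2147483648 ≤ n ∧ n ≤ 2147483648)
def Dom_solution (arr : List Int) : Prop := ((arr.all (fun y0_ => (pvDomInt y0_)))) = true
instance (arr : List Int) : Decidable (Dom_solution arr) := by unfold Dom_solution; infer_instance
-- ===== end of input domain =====

-- B replaces A's fused running-minimum/index scan + in-place del by sorting the (value, index)
-- pairs lexicographically, reading the first occurrence of the minimum off the sorted head, and
-- rebuilding the result from two slices. A mutates arr in place (del); B does not — the
-- equivalence proved here is about the return value.

-- ===== PORT A =====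
def solution (arr : List Int) : List Int :=
  match arr with
  | [] => []  -- Python: arr[0] raises IndexError; excluded by Pre_solution
  | a0 :: _ =>
    let s := (PySem.List.pyRange 0 arr.length 1).foldl
      (fun (s : Int × Int) idx =>
        if PySem.List.pyGetD arr idx 0 < s.1 then (PySem.List.pyGetD arr idx 0, idx) else s)
      (a0, 0)
    let arr' := match PySem.List.pop? arr s.2 with  -- del arr[min_idx]
      | some r => r.2
      | none => arr  -- unreachable: min_idx is always in range
    if arr' = [] then [-1] else arr'

-- ===== PORT B =====
def solution_alt (arr : List Int) : List Int :=
  -- sorted(zip(arr, range(len(arr))))[0][1]: Python sorts the tuples lexicographically,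
  -- which is sorted2 with the two projections as keys.
  match PySem.List.pyGet?
      (PySem.List.sorted2 (arr.zip (PySem.List.pyRange 0 arr.length 1))
        (fun p => p.1) (fun p => p.2)) 0 with
  | none => []  -- Python: [0] on the empty sorted list raises IndexError; excluded by Pre_solution
  | some p =>
    let res := PySem.List.slice arr none (some p.2) ++ PySem.List.slice arr (some (p.2 + 1)) none
    if res = [] then [-1] else res

-- ===== PRECONDITION & SPEC =====
-- Pre_ excludes the empty list, on which both Pythons raise IndexError.
def Pre_solution (arr : List Int) : Prop := arr ≠ []
instance (arr : List Int) : Decidable (Pre_solution arr) := by unfold Pre_solution; infer_instance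
def pvWitness_solution : List Int := ([4, 3, 2, 3])

def Spec_solution (arr : List Int) (out : List Int) : Prop := out = solution_alt arr
instance (arr : List Int) (out : List Int) : Decidable (Spec_solution arr out) := by unfold Spec_solution; infer_instance

-- ===== CLAIM (what is proved, stated in full; the proofs are below) =====
def Claim_equal_solution : Prop := ∀ (arr : List Int), Dom_solution arr → Pre_solution arr → Spec_solution arr (solution arr)

-- ===== LEMMAS AND PROOFS =====

lemma foldl_min_le (t : List Int) (a : Int) : t.foldl min a ≤ a := by
  induction t generalizing a with
  | nil => simp
  | cons x t ih => exact le_trans (ih (min a x)) (min_le_left a x)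

lemma foldl_min_mem (t : List Int) (a : Int) : t.foldl min a ∈ a :: t := by
  induction t generalizing a with
  | nil => simp
  | cons x t ih =>
    have h := ih (min a x)
    simp only [List.foldl_cons, List.mem_cons] at h ⊢
    rcases h with h | h
    · rw [h]
      rcases le_total a x with h1 | h1
      · exact Or.inl (min_eq_left h1)
      · exact Or.inr (Or.inl (min_eq_right h1))
    · exact Or.inr (Or.inr h)

lemma fmlm_aux (x : Int) : ∀ (t : List Int) (a : Int), x ∈ t → t.foldl min a ≤ x
  | [], _, h => by simp at h
  | y :: s, a, h => by
    rw [List.foldl_cons]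
    rcases List.mem_cons.mp h with h2 | h2
    · exact le_trans (foldl_min_le s (min a y)) (by rw [h2]; exact min_le_right a y)
    · exact fmlm_aux x s (min a y) h2

lemma foldl_min_le_mem (t : List Int) (a x : Int) (hx : x ∈ a :: t) : t.foldl min a ≤ x := by
  rcases List.mem_cons.mp hx with h | h
  · rw [h]; exact foldl_min_le t a
  · exact fmlm_aux x t a h

-- the loop invariant of A's fused minimum+index loop, over enumerate
lemma loopA (xs : List Int) (s mn mi : Int) :
    (PySem.List.enumerate xs s).foldl
      (fun (st : Int × Int) p => if p.2 < st.1 then (p.2, p.1) else st) (mn, mi)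
    = (xs.foldl min mn,
       if xs.foldl min mn < mn then s + (xs.idxOf (xs.foldl min mn) : Int) else mi) := by
  induction xs generalizing s mn mi with
  | nil => simp [PySem.List.enumerate]
  | cons x t ih =>
    have hle : ∀ (a : Int), t.foldl min a ≤ a := fun a => foldl_min_le t a
    simp only [PySem.List.enumerate_cons, List.foldl_cons]
    by_cases hx : x < mn
    · simp only [hx, if_pos, ih]
      have hminx : min mn x = x := min_eq_right (le_of_lt hx)
      simp only [hminx]
      by_cases h2 : t.foldl min x < x
      · have hne : x ≠ t.foldl min x := by omega
        have : (x :: t).idxOf (t.foldl min x) = t.idxOf (t.foldl min x) + 1 := by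
          simp [hne]
        rw [if_pos h2, if_pos (lt_trans h2 hx), this]
        push_cast; ring_nf
      · have heq : t.foldl min x = x := le_antisymm (hle x) (not_lt.mp h2)
        rw [if_neg h2, heq, if_pos hx]
        simp
    · simp only [if_neg hx, ih]
      have hminx : min mn x = mn := min_eq_left (not_lt.mp hx)
      simp only [hminx]
      by_cases h2 : t.foldl min mn < mn
      · have hne : x ≠ t.foldl min mn := by
          have := not_lt.mp hx; omega
        have : (x :: t).idxOf (t.foldl min mn) = t.idxOf (t.foldl min mn) + 1 := by
          simp [hne]
        rw [if_pos h2, if_pos h2, this]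
        push_cast; ring_nf
      · rw [if_neg h2, if_neg h2]

lemma min_idxOf_cons (a0 : Int) (t : List Int) :
    (if t.foldl min a0 < a0
       then (0 : Int) + ((a0 :: t).idxOf (t.foldl min a0) : Int) else 0)
    = ((a0 :: t).idxOf (t.foldl min a0) : Int) := by
  by_cases h2 : t.foldl min a0 < a0
  · rw [if_pos h2]; ring
  · have heq : t.foldl min a0 = a0 := le_antisymm (foldl_min_le t a0) (not_lt.mp h2)
    rw [if_neg h2, heq]
    simp

-- A's result, in closed form: erase the first occurrence of the minimum, then the [-1] guard
lemma solutionA_eq (a0 : Int) (t : List Int) :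
    solution (a0 :: t)
    = (if (a0 :: t).eraseIdx ((a0 :: t).idxOf (t.foldl min a0)) = []
       then [-1] else (a0 :: t).eraseIdx ((a0 :: t).idxOf (t.foldl min a0))) := by
  unfold solution
  dsimp only
  set m := t.foldl min a0 with hm
  have hen : PySem.List.enumerate (a0 :: t) 0
      = (PySem.List.pyRange 0 ((a0 :: t).length) 1).map
          (fun j => (j, PySem.List.pyGetD (a0 :: t) j 0)) := by
    simpa using PySem.List.enumerate_eq_map_pyRange (a0 :: t) (0 : Int)
  have hfold :
      (PySem.List.pyRange 0 ((a0 :: t).length : Int) 1).foldl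
        (fun (s : Int × Int) idx =>
          if PySem.List.pyGetD (a0 :: t) idx 0 < s.1
          then (PySem.List.pyGetD (a0 :: t) idx 0, idx) else s) (a0, 0)
      = (m, ((a0 :: t).idxOf m : Int)) := by
    have hL := loopA (a0 :: t) 0 a0 0
    rw [hen, List.foldl_map] at hL
    simp only [List.foldl_cons, min_self, ← hm] at hL
    rw [hL]
    exact congrArg (Prod.mk m) (min_idxOf_cons a0 t)
  rw [hfold]
  have hmem : m ∈ a0 :: t := foldl_min_mem t a0
  have hidx : (a0 :: t).idxOf m < (a0 :: t).length := List.idxOf_lt_length_of_mem hmem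
  have hpop : PySem.List.pop? (a0 :: t) (((a0 :: t).idxOf m : Nat) : Int)
      = some ((a0 :: t)[(a0 :: t).idxOf m], (a0 :: t).eraseIdx ((a0 :: t).idxOf m)) :=
    PySem.List.pop?_natCast _ _ hidx
  rw [hpop]

-- idxOf is the FIRST index of m: any index holding m is ≥ idxOf
lemma idxOf_le_of_getElem (l : List Int) (m : Int) (k : Nat) (h : k < l.length)
    (hm : l[k] = m) : l.idxOf m ≤ k := by
  induction l generalizing k with
  | nil => simp at h
  | cons x t ih =>
    cases k with
    | zero => simp at hm; simp [hm]
    | succ k =>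
      by_cases hx : x = m
      · simp [hx]
      · have : t.idxOf m ≤ k := ih k (by simpa using h) (by simpa using hm)
        have hbe : (x == m) = false := by simpa using hx
        simp only [List.idxOf_cons, hbe, cond_false]
        omega

-- insertBy only looks at its comparator on the element and the accumulator
lemma insertBy_congr {α : Type} (P : α → Prop) (f g : α → α → Bool)
    (hfg : ∀ a b, P a → P b → f a b = g a b) (x : α) (hx : P x) :
    ∀ (acc : List α), (∀ y ∈ acc, P y) →
      PySem.List.insertBy f x acc = PySem.List.insertBy g x acc := by
  intro acc
  induction acc with
  | nil => intro _; rfl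
  | cons y ys ih =>
    intro hacc
    have hy : P y := hacc y (List.mem_cons_self)
    simp only [PySem.List.insertBy, hfg x y hx hy]
    by_cases h : g x y = true
    · simp [h]
    · simp only [h]
      rw [ih (fun z hz => hacc z (List.mem_cons_of_mem _ hz))]

lemma foldl_insertBy_congr {α : Type} (P : α → Prop) (f g : α → α → Bool)
    (hfg : ∀ a b, P a → P b → f a b = g a b) :
    ∀ (xs acc : List α), (∀ y ∈ xs, P y) → (∀ y ∈ acc, P y) →
      xs.foldl (fun acc x => PySem.List.insertBy f x acc) acc
      = xs.foldl (fun acc x => PySem.List.insertBy g x acc) acc := by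
  intro xs
  induction xs with
  | nil => intro acc _ _; rfl
  | cons x t ih =>
    intro acc hxs hacc
    have hx : P x := hxs x (List.mem_cons_self)
    simp only [List.foldl_cons]
    rw [insertBy_congr P f g hfg x hx acc hacc]
    exact ih _ (fun y hy => hxs y (List.mem_cons_of_mem _ hy))
      (fun y hy => (PySem.List.mem_insertBy g x y acc).mp hy |>.elim
        (fun h => h ▸ hx) (fun h => hacc y h))

-- on pairs whose second component lies in [0, n), Python's lexicographic tuple sort
-- is a plain sort by the combined integer key p.1 * n + p.2
lemma sorted2_eq_sorted_keyC (ys : List (Int × Int)) (n : Int)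
    (hb : ∀ p ∈ ys, 0 ≤ p.2 ∧ p.2 < n) :
    PySem.List.sorted2 ys (fun p => p.1) (fun p => p.2)
    = PySem.List.sorted ys (fun p => p.1 * n + p.2) := by
  unfold PySem.List.sorted2 PySem.List.sorted
  simp only [if_neg (by decide : ¬ (false = true))]
  apply foldl_insertBy_congr (fun p => p ∈ ys)
  · intro a b ha hb'
    have hA := hb a ha
    have hB := hb b hb'
    by_cases h1 : a.1 < b.1
    · have : a.1 * n + a.2 < b.1 * n + b.2 := by nlinarith [hA.1, hA.2, hB.1, hB.2]
      simp [h1, this]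
    · by_cases h2 : b.1 < a.1
      · have : ¬ (a.1 * n + a.2 < b.1 * n + b.2) := by nlinarith [hA.1, hA.2, hB.1, hB.2]
        simp [h1, h2, this]
      · have he : a.1 = b.1 := le_antisymm (not_lt.mp h2) (not_lt.mp h1)
        have : (a.1 * n + a.2 < b.1 * n + b.2) ↔ a.2 < b.2 := by rw [he]; omega
        simp [h1, h2, this]
  · exact fun y hy => hy
  · simp

-- membership in zip(arr, range(len(arr)))
lemma mem_zip_range (arr : List Int) (p : Int × Int) :
    p ∈ arr.zip (PySem.List.pyRange 0 arr.length 1)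
    ↔ ∃ (k : Nat) (h : k < arr.length), p = (arr[k], (k : Int)) := by
  have hlen : (PySem.List.pyRange 0 (arr.length : Int) 1).length = arr.length := by
    rw [PySem.List.length_pyRange_one]; simp
  constructor
  · intro hp
    rw [List.mem_iff_getElem] at hp
    obtain ⟨k, hk, hget⟩ := hp
    have hk' : k < arr.length := by
      simpa [List.length_zip, hlen] using hk
    refine ⟨k, hk', ?_⟩
    rw [List.getElem_zip] at hget
    rw [← hget]
    congr 1
    rw [PySem.List.getElem_pyRange_one]
    simp
  · rintro ⟨k, hk, rfl⟩
    rw [List.mem_iff_getElem]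
    refine ⟨k, by simp [List.length_zip, hlen, hk], ?_⟩
    rw [List.getElem_zip]
    congr 1
    rw [PySem.List.getElem_pyRange_one]
    simp

-- the head of the lexicographically sorted zip is (min, first index of min)
lemma head_sorted_zip (a0 : Int) (t : List Int) :
    PySem.List.sorted2 ((a0 :: t).zip (PySem.List.pyRange 0 (a0 :: t).length 1))
      (fun p => p.1) (fun p => p.2)
    = (t.foldl min a0, (((a0 :: t).idxOf (t.foldl min a0) : Nat) : Int))
      :: (PySem.List.sorted2 ((a0 :: t).zip (PySem.List.pyRange 0 (a0 :: t).length 1))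
            (fun p => p.1) (fun p => p.2)).tail := by
  set arr := a0 :: t with harr
  set m := t.foldl min a0 with hm
  set i0 := arr.idxOf m with hi0
  set n : Int := (arr.length : Int) with hn
  set ys := arr.zip (PySem.List.pyRange 0 arr.length 1) with hys
  have hmem : m ∈ arr := foldl_min_mem t a0
  have hi0lt : i0 < arr.length := List.idxOf_lt_length_of_mem hmem
  have hbounds : ∀ p ∈ ys, 0 ≤ p.2 ∧ p.2 < n := by
    intro p hp
    obtain ⟨k, hk, rfl⟩ := (mem_zip_range arr p).mp hp
    constructor
    · show (0 : Int) ≤ (k : Int)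
      exact_mod_cast Nat.zero_le k
    · show ((k : Int)) < n
      rw [hn]
      exact_mod_cast hk
  have hkey := sorted2_eq_sorted_keyC ys n hbounds
  -- the distinguished pair
  have hpair : ((m, ((i0 : Nat) : Int)) : Int × Int) ∈ ys := by
    rw [mem_zip_range]
    exact ⟨i0, hi0lt, by rw [List.getElem_idxOf hi0lt]⟩
  -- it minimizes the combined key, strictly except at itself
  have hmin : ∀ p ∈ ys, p ≠ (m, ((i0 : Nat) : Int)) →
      m * n + (i0 : Int) < p.1 * n + p.2 := by
    intro p hp hne
    obtain ⟨k, hk, rfl⟩ := (mem_zip_range arr p).mp hp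
    have hmle : m ≤ arr[k] := foldl_min_le_mem t a0 _ (List.getElem_mem hk)
    rcases lt_or_eq_of_le hmle with hlt | heq
    · have h1 : (i0 : Int) < n := by rw [hn]; exact_mod_cast hi0lt
      have h2 : (0 : Int) ≤ (k : Int) := by exact_mod_cast Nat.zero_le k
      nlinarith
    · have hk0 : i0 ≤ k := idxOf_le_of_getElem arr m k hk heq.symm
      have hne2 : i0 ≠ k := by
        intro h
        apply hne
        simp [← heq, h]
      have : (i0 : Int) < (k : Int) := by exact_mod_cast lt_of_le_of_ne hk0 hne2
      simp only [← heq]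
      omega
  -- sorted ys keyC is nonempty; its head equals the pair
  rw [hkey]
  rcases hsn : PySem.List.sorted ys (fun p => p.1 * n + p.2) with _ | ⟨h, tl⟩
  · rw [PySem.List.sorted_eq_nil_iff] at hsn
    have := hpair
    rw [hsn] at this
    simp at this
  · have hhead_mem : h ∈ ys := by
      have : h ∈ PySem.List.sorted ys (fun p => p.1 * n + p.2) := by
        rw [hsn]; exact List.mem_cons_self
      rwa [PySem.List.mem_sorted] at this
    have hle := PySem.List.key_head_sorted_le ys (fun p => p.1 * n + p.2) hsn
        _ hpair
    have : h = (m, ((i0 : Nat) : Int)) := by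
      by_contra hne
      have := hmin h hhead_mem hne
      simp only at hle this
      omega
    simp [this]

-- ===== VERDICT (by name: the statement is the Claim_ definition above) =====
theorem solution_spec : Claim_equal_solution := by
  intro arr _ hpre
  unfold Spec_solution
  rcases arr with _ | ⟨a0, t⟩
  · exact absurd rfl hpre
  · rw [solutionA_eq]
    unfold solution_alt
    rw [head_sorted_zip a0 t]
    have hg : ∀ (p : Int × Int) (l : List (Int × Int)),
        PySem.List.pyGet? (p :: l) 0 = some p := by
      intro p l; simp [PySem.List.pyGet?, PySem.List.pyIdx?]
    rw [hg]
    set m := t.foldl min a0 with hm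
    set i0 := (a0 :: t).idxOf m with hi0
    have h1 : PySem.List.slice (a0 :: t) none (some ((i0 : Nat) : Int))
        = (a0 :: t).take i0 := PySem.List.slice_to_natCast _ _
    have h2 : PySem.List.slice (a0 :: t) (some (((i0 : Nat) : Int) + 1)) none
        = (a0 :: t).drop (i0 + 1) := by
      have : (((i0 : Nat) : Int) + 1) = (((i0 + 1 : Nat)) : Int) := by push_cast; ring
      rw [this]
      exact PySem.List.slice_from_natCast _ _
    dsimp only
    rw [h1, h2, ← List.eraseIdx_eq_take_drop_succ]
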